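-- pv_equiv track=rewrite | github.com/Aarhus-Psychiatry-Research/psycop-common | psycop/projects/forced_admission_outpatient/old_project_code/model_eval/model_description/performance/outcome_with_multiple_pred_times.py | _is_ones_then_zeros
-- ===== SOURCE A (Python) =====
-- from collections.abc import Sequence
--
-- def _is_ones_then_zeros(seq: Sequence[int]) -> bool:
--     change_occurred = False
--     for i in range(1, len(seq)):
--         if seq[i] != seq[i - 1]:
--             if change_occurred:  # If the sequence changed more than once
--                 return False
--             change_occurred = True
--     return bool(seq[0] == 1 and seq[-1] == 0)
-- ===== SOURCE B (Python) =====
-- def _is_ones_then_zeros(seq):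
--     # Guard the endpoints; the first subscript raises IndexError on empty input, as in A.
--     if seq[0] != 1 or seq[-1] != 0:
--         return False
--     k = seq.index(0)  # first zero exists because the last element is 0
--     return all(x == 1 for x in seq[:k]) and all(x == 0 for x in seq[k:])
-- ===== Notes on version B (the rewrite author's own statement) =====
-- stated objective: simpler
-- what changed: A counts adjacent value changes in one running scan with an early exit; B guards the two endpoints, locates the single 1->0 boundary with seq.index(0), and verifies the prefix is all ones and the suffix all zeros.
import Mathlib
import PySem

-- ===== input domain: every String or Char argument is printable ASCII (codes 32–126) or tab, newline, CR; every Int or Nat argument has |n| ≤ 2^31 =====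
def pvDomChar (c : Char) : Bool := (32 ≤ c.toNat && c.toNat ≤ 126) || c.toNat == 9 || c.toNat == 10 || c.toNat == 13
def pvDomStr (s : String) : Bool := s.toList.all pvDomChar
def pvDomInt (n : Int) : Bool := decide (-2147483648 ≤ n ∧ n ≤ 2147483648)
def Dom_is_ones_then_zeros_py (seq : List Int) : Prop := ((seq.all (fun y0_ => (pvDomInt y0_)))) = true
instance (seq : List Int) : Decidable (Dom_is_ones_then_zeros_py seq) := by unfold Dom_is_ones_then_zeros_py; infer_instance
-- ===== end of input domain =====

-- B replaces A's running change-count scan by an endpoint guard plus a find-the-boundary /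
-- check-each-half decomposition (objective: simpler); same O(n) cost.

-- ===== PORT A =====
-- A's loop over i in range(1, len(seq)), comparing seq[i] with seq[i-1]: ported as structural
-- recursion carrying the previous element and the change flag; `some false` = early return,
-- `none` = the loop ran to completion.
def pvALoop (prev : Int) (rest : List Int) (changed : Bool) : Option Bool :=
  match rest with
  | [] => none
  | x :: xs =>
    if x ≠ prev then
      if changed then some false else pvALoop x xs true
    else pvALoop x xs changed

def is_ones_then_zeros_py (seq : List Int) : Bool :=
  match seq with
  | [] => false  -- Python raises IndexError at the first subscript; excluded by Pre_
  | h :: t =>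
    match pvALoop h t false with
    | some b => b
    | none => h == 1 && (h :: t).getLastD 0 == 0   -- first and last element of the nonempty list

-- ===== PORT B =====
def is_ones_then_zeros_py_alt (seq : List Int) : Bool :=
  -- first/last element of the nonempty (Pre_) list; empty list is excluded by Pre_
  if seq.headD 0 != 1 || seq.getLastD 0 != 0 then false
  else
    match PySem.List.index? seq 0 with
    | some k => (seq.take k).all (· == 1) && (seq.drop k).all (· == 0)
    | none => false  -- unreachable: the guard ensures 0 ∈ seq

-- ===== PRECONDITION & SPEC =====
-- Pre_ excludes only the empty list, on which A (and B) raise IndexError at the first subscript.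
def Pre_is_ones_then_zeros_py (seq : List Int) : Prop := seq ≠ []
instance (seq : List Int) : Decidable (Pre_is_ones_then_zeros_py seq) := by
  unfold Pre_is_ones_then_zeros_py; infer_instance

def pvWitness_is_ones_then_zeros_py : List Int := [1, 0]

def Spec_is_ones_then_zeros_py (seq : List Int) (out : Bool) : Prop := out = is_ones_then_zeros_py_alt seq
instance (seq : List Int) (out : Bool) : Decidable (Spec_is_ones_then_zeros_py seq out) := by unfold Spec_is_ones_then_zeros_py; infer_instance

-- ===== CLAIM (what is proved, stated in full; the proofs are below) =====
def Claim_equal_is_ones_then_zeros_py : Prop := ∀ (seq : List Int), Dom_is_ones_then_zeros_py seq → Pre_is_ones_then_zeros_py seq → Spec_is_ones_then_zeros_py seq (is_ones_then_zeros_py seq)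

-- ===== LEMMAS AND PROOFS =====

-- Both programs accept exactly the lists of the form 1^a 0^b with a, b ≥ 1.
def pvNice (seq : List Int) : Prop :=
  ∃ a b : Nat, 1 ≤ a ∧ 1 ≤ b ∧ seq = List.replicate a 1 ++ List.replicate b 0

theorem pvALoop_ne_some_true (rest : List Int) :
    ∀ prev changed, pvALoop prev rest changed ≠ some true := by
  induction rest with
  | nil => intro prev changed; simp [pvALoop]
  | cons x xs ih =>
    intro prev changed
    simp only [pvALoop]
    split_ifs with h1 h2
    · simp
    · exact ih x true
    · exact ih x changed

theorem pvLastD (l : List Int) (q : Int) (b : Nat) (hb : 1 ≤ b) :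
    (l ++ List.replicate b q).getLastD 0 = q := by
  cases b with
  | zero => omega
  | succ b' =>
    rw [List.replicate_succ' (n := b'), ← List.append_assoc,
      List.getLastD_eq_getLast?, List.getLast?_concat]
    rfl

theorem pvALoop_true_none (rest : List Int) :
    ∀ prev, pvALoop prev rest true = none ↔ ∀ x ∈ rest, x = prev := by
  induction rest with
  | nil => intro prev; simp [pvALoop]
  | cons x xs ih =>
    intro prev
    by_cases h : x = prev
    · subst h; simp [pvALoop, ih x]
    · simp [pvALoop, h]

theorem pvALoop_false_none (rest : List Int) :
    ∀ prev, pvALoop prev rest false = none ↔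
      (∀ x ∈ rest, x = prev) ∨
      ∃ (q : Int) (a b : Nat), q ≠ prev ∧ 1 ≤ b ∧
        rest = List.replicate a prev ++ List.replicate b q := by
  induction rest with
  | nil =>
    intro prev
    constructor
    · intro _; left; simp
    · intro _; rfl
  | cons x xs ih =>
    intro prev
    by_cases h : x = prev
    · subst h
      have hred : pvALoop x (x :: xs) false = pvALoop x xs false := by
        simp [pvALoop]
      rw [hred, ih x]
      constructor
      · rintro (hc | ⟨q, a, b, hq, hb, hxs⟩)
        · left; intro y hy
          rcases List.mem_cons.mp hy with rfl | hy
          · rfl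
          · exact hc y hy
        · right; exact ⟨q, a + 1, b, hq, hb, by simp [List.replicate_succ, hxs]⟩
      · rintro (hc | ⟨q, a, b, hq, hb, hxxs⟩)
        · left; intro y hy; exact hc y (List.mem_cons_of_mem _ hy)
        · cases a with
          | zero =>
            exfalso
            cases b with
            | zero => simp at hb
            | succ b' =>
              simp [List.replicate_succ] at hxxs
              exact hq hxxs.1.symm
          | succ a' =>
            right
            refine ⟨q, a', b, hq, hb, ?_⟩
            simpa [List.replicate_succ] using hxxs
    · have hred : pvALoop prev (x :: xs) false = pvALoop x xs true := by
        simp [pvALoop, h]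
      rw [hred, pvALoop_true_none xs x]
      constructor
      · intro hc
        right
        refine ⟨x, 0, xs.length + 1, h, by omega, ?_⟩
        simp [List.replicate_succ]
        exact List.eq_replicate_of_mem (by intro y hy; exact hc y hy)
      · rintro (hc | ⟨q, a, b, hq, hb, hxxs⟩)
        · exact absurd (hc x List.mem_cons_self) h
        · cases a with
          | zero =>
            cases b with
            | zero => simp at hb
            | succ b' =>
              simp [List.replicate_succ] at hxxs
              obtain ⟨rfl, hxs⟩ := hxxs
              intro y hy
              rw [hxs] at hy
              exact List.eq_of_mem_replicate hy
          | succ a' =>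
            simp [List.replicate_succ] at hxxs
            exact absurd hxxs.1 h

theorem pvA_true_iff (seq : List Int) (hne : seq ≠ []) :
    is_ones_then_zeros_py seq = true ↔ pvNice seq := by
  cases seq with
  | nil => exact absurd rfl hne
  | cons h t =>
    simp only [is_ones_then_zeros_py]
    constructor
    · intro htrue
      cases hA : pvALoop h t false with
      | some b =>
        rw [hA] at htrue
        simp at htrue
        subst htrue
        exact absurd hA (pvALoop_ne_some_true t h false)
      | none =>
        rw [hA] at htrue
        simp only [Bool.and_eq_true, beq_iff_eq] at htrue
        obtain ⟨h1, hlast⟩ := htrue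
        subst h1
        rcases (pvALoop_false_none t 1).mp hA with hc | ⟨q, a, b, hq, hb, ht⟩
        · exfalso
          have ht' : t = List.replicate t.length 1 := List.eq_replicate_of_mem hc
          have hone : (1 :: t : List Int).getLastD 0 = 1 := by
            have hform : (1 :: t : List Int) = [] ++ List.replicate (t.length + 1) 1 := by
              rw [List.replicate_succ, List.nil_append]
              exact congrArg _ ht'
            rw [hform, pvLastD _ _ _ (by omega)]
          omega
        · have hq0 : q = 0 := by
            have hlq : (1 :: t : List Int).getLastD 0 = q := by
              have hform : (1 : Int) :: t
                  = ((1 : Int) :: List.replicate a 1) ++ List.replicate b q := by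
                rw [ht]; simp
              rw [hform, pvLastD _ _ _ hb]
            omega
          subst hq0
          exact ⟨a + 1, b, by omega, hb, by simp [ht, List.replicate_succ]⟩
    · rintro ⟨a, b, ha, hb, hseq⟩
      cases a with
      | zero => omega
      | succ a' =>
        rw [List.replicate_succ, List.cons_append] at hseq
        obtain ⟨rfl, ht⟩ := List.cons_eq_cons.mp hseq
        have hloop : pvALoop 1 t false = none := by
          rw [pvALoop_false_none t 1]
          right
          exact ⟨0, a', b, by norm_num, hb, ht⟩
        rw [hloop]
        have hlast : (1 :: t : List Int).getLastD 0 = 0 := by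
          have hform : (1 : Int) :: t
              = ((1 : Int) :: List.replicate a' 1) ++ List.replicate b 0 := by
            rw [ht]; simp
          rw [hform, pvLastD _ _ _ hb]
        simp only [Bool.and_eq_true, beq_iff_eq]
        exact ⟨trivial, hlast⟩

theorem pvIndex_nice (b : Nat) (hb : 1 ≤ b) :
    ∀ a : Nat, PySem.List.index? (List.replicate a (1 : Int) ++ List.replicate b 0) 0 = some a := by
  intro a
  induction a with
  | zero =>
    cases b with
    | zero => omega
    | succ b' =>
      rw [List.replicate_zero, List.nil_append, List.replicate_succ]
      exact PySem.List.index?_cons_self 0 _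
  | succ a' ih =>
    rw [List.replicate_succ, List.cons_append,
      PySem.List.index?_cons_of_ne _ (by norm_num : (1 : Int) ≠ 0), ih]
    rfl

theorem pvB_true_iff (seq : List Int) (hne : seq ≠ []) :
    is_ones_then_zeros_py_alt seq = true ↔ pvNice seq := by
  constructor
  · intro htrue
    simp only [is_ones_then_zeros_py_alt] at htrue
    split_ifs at htrue with hguard
    cases hidx : PySem.List.index? seq 0 with
      | none => rw [hidx] at htrue; simp at htrue
      | some k =>
      rw [hidx] at htrue
      simp only [Bool.and_eq_true, List.all_eq_true, beq_iff_eq] at htrue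
      obtain ⟨hones, hzeros⟩ := htrue
      obtain ⟨pre, suf, hsp, hlen, hnot⟩ := (PySem.List.index?_eq_some_iff seq 0 k).mp hidx
      have hpre : seq.take k = pre := by rw [hsp, ← hlen, List.take_left]
      have hsuf : seq.drop k = 0 :: suf := by rw [hsp, ← hlen, List.drop_left]
      have hpre_rep : pre = List.replicate k (1 : Int) := by
        rw [← hlen]
        exact List.eq_replicate_of_mem (fun x hx => hones x (hpre ▸ hx))
      have hsuf_rep : (0 :: suf : List Int) = List.replicate (suf.length + 1) 0 := by
        have : ((0 : Int) :: suf).length = suf.length + 1 := by simp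
        rw [← this]
        exact List.eq_replicate_of_mem (fun x hx => hzeros x (hsuf ▸ hx))
      have hk1 : 1 ≤ k := by
        rcases Nat.eq_zero_or_pos k with rfl | hpos
        · exfalso
          have hpre0 : pre = [] := by simpa using hpre_rep
          rw [hsp, hpre0] at hguard
          simp at hguard
        · exact hpos
      refine ⟨k, suf.length + 1, hk1, by omega, ?_⟩
      rw [hsp, hpre_rep, ← hsuf_rep]
  · rintro ⟨a, b, ha, hb, rfl⟩
    have hhead : (List.replicate a (1 : Int) ++ List.replicate b 0).headD 0 = 1 := by
      cases a with
      | zero => omega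
      | succ a' => simp [List.replicate_succ]
    have hlast : (List.replicate a (1 : Int) ++ List.replicate b 0).getLastD 0 = 0 :=
      pvLastD _ _ _ hb
    simp only [is_ones_then_zeros_py_alt, hhead, hlast]
    rw [if_neg (by simp), pvIndex_nice b hb a]
    show ((List.take a (List.replicate a (1 : Int) ++ List.replicate b 0)).all (· == 1) &&
      (List.drop a (List.replicate a (1 : Int) ++ List.replicate b 0)).all (· == 0)) = true
    rw [List.take_left' (by simp), List.drop_left' (by simp)]
    simp only [List.all_eq_true, beq_iff_eq, Bool.and_eq_true]
    exact ⟨fun x hx => List.eq_of_mem_replicate hx, fun x hx => List.eq_of_mem_replicate hx⟩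

-- ===== VERDICT (by name: the statement is the Claim_ definition above) =====
theorem is_ones_then_zeros_py_spec : Claim_equal_is_ones_then_zeros_py := by
  intro seq _ hpre
  unfold Spec_is_ones_then_zeros_py
  have h := (pvA_true_iff seq hpre).trans (pvB_true_iff seq hpre).symm
  exact Bool.coe_iff_coe.mp h
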